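-- pv_equiv track=rewrite | github.com/gaeunpark924/PS-practice | 브루트포스알고리즘/한수_분해합_블랙잭.py | solution
-- ===== SOURCE A (Python) =====
-- from itertools import combinations
--
-- def solution(n,m,num_card):
--     x = list(combinations(num_card, 3))
--     result = []
--     for i in x:
--         result.append(sum(i))
--     result = sorted(result)
--     for i in range(len(result)):
--         if result[i] > m:
--             return result[i-1]
--     return result[-1]
-- ===== SOURCE B (Python) =====
-- from itertools import combinations
--
-- def solution(n, m, num_card):
--     # Single streaming pass with a running best under the key (s <= m, s):
--     # sums within the limit beat sums above it, then larger wins.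
--     # Nothing is materialized and nothing is sorted.
--     best = None
--     for a, b, c in combinations(num_card, 3):
--         s = a + b + c
--         if best is None or (s <= m, s) > (best <= m, best):
--             best = s
--     return best
-- ===== Notes on version B (the rewrite author's own statement) =====
-- stated objective: faster
-- what changed: A materializes all C(n,3) triple sums, sorts them and scans for the first sum above m; B keeps a single running best over one streaming pass, ordered by the key (s <= m, s), so no list is built and no sort happens.
import Mathlib
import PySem

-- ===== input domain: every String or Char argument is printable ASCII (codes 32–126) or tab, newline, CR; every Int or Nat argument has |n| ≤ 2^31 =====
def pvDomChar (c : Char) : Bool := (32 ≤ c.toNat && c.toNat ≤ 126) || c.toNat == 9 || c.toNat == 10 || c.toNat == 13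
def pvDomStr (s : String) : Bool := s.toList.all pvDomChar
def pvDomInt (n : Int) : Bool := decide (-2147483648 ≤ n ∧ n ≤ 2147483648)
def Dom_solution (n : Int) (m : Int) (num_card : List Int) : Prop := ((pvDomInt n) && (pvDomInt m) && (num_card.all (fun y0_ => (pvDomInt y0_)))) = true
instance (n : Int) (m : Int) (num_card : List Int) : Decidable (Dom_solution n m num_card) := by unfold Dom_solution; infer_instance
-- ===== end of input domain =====

-- B replaces A's materialize-sort-scan over all triple sums by one streaming pass
-- with a running best under the key (s ≤ m, s); measurably faster by a constant factor.

-- ===== PORT A =====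
-- itertools.combinations(xs, r) in Python's order (lexicographic by index)
def solutionCombs : Nat → List Int → List (List Int)
  | 0, _ => [[]]
  | _+1, [] => []
  | r+1, x :: xs => ((solutionCombs r xs).map (fun t => x :: t)) ++ solutionCombs (r+1) xs

-- 'for i in range(len(result)): if result[i] > m: return result[i-1]' then 'return result[-1]'
-- (result[i-1] at i = 0 is Python's negative-index access result[-1])
def solutionScan (m : Int) (res : List Int) (i : Nat) : Int :=
  if h : i < res.length then
    if m < res[i] then PySem.List.pyGetD res ((i : Int) - 1) 0
    else solutionScan m res (i + 1)
  else PySem.List.pyGetD res (-1) 0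
termination_by res.length - i

def solution (n : Int) (m : Int) (num_card : List Int) : Int :=
  let x := solutionCombs 3 num_card
  let result := x.foldl (fun acc i => acc ++ [i.sum]) []
  let result := PySem.List.sorted result (fun s => s) false
  solutionScan m result 0

-- ===== PORT B =====
-- Python tuple comparison (s <= m, s) > (b <= m, b)
def keyGt (m s b : Int) : Bool :=
  (decide (s ≤ m) && !decide (b ≤ m)) || (decide (s ≤ m) == decide (b ≤ m) && decide (b < s))

-- 'if best is None or (s <= m, s) > (best <= m, best): best = s'
def kstep (m : Int) (best : Option Int) (s : Int) : Option Int :=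
  match best with
  | none => some s
  | some b => if keyGt m s b then some s else some b

def solution_alt (n : Int) (m : Int) (num_card : List Int) : Int :=
  ((solutionCombs 3 num_card).foldl
      (fun best t =>
        match t with
        | [a, b, c] => kstep m best (a + b + c)
        | _ => best)
      none).getD 0   -- .getD 0: Python B yields None only with fewer than 3 cards, excluded by Pre_

-- ===== PRECONDITION & SPEC =====
-- A raises IndexError (result[-1] on the empty sum list) when fewer than 3 cards are given;
-- Python B returns None there (not an int). Exactly those inputs are excluded.
def Pre_solution (n : Int) (m : Int) (num_card : List Int) : Prop := 3 ≤ num_card.length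
instance (n : Int) (m : Int) (num_card : List Int) : Decidable (Pre_solution n m num_card) := by unfold Pre_solution; infer_instance
def pvWitness_solution : Int × Int × List Int := (3, 10, [1, 2, 3])
def Spec_solution (n : Int) (m : Int) (num_card : List Int) (out : Int) : Prop := out = solution_alt n m num_card
instance (n : Int) (m : Int) (num_card : List Int) (out : Int) : Decidable (Spec_solution n m num_card out) := by unfold Spec_solution; infer_instance

-- ===== CLAIM (what is proved, stated in full; the proofs are below) =====
def Claim_equal_solution : Prop := ∀ (n : Int) (m : Int) (num_card : List Int), Dom_solution n m num_card → Pre_solution n m num_card → Spec_solution n m num_card (solution n m num_card)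

-- ===== LEMMAS AND PROOFS =====

-- x loses to b under the key (x ≤ m, x) whenever x ≤ b with (b within limit or x over it), or x over and b within
lemma keyGt_false_cases {m x b : Int}
    (h : (x ≤ b ∧ (b ≤ m ∨ m < x)) ∨ (m < x ∧ b ≤ m)) : keyGt m x b = false := by
  unfold keyGt
  by_cases hx : x ≤ m <;> by_cases hb : b ≤ m <;> simp_all <;> omega

lemma keyGt_ff {m a b : Int} (h1 : keyGt m a b = false) (h2 : keyGt m b a = false) : a = b := by
  unfold keyGt at h1 h2
  by_cases hx : a ≤ m <;> by_cases hb : b ≤ m <;> simp_all <;> omega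

lemma keyGt_asymm {m a b : Int} (h : keyGt m a b = true) : keyGt m b a = false := by
  unfold keyGt at h ⊢
  by_cases hx : a ≤ m <;> by_cases hb : b ≤ m <;> simp_all <;> omega

lemma keyGt_trans_ff {m a b c : Int} (h1 : keyGt m a b = false) (h2 : keyGt m b c = false) :
    keyGt m a c = false := by
  unfold keyGt at h1 h2 ⊢
  by_cases hx : a ≤ m <;> by_cases hb : b ≤ m <;> by_cases hc : c ≤ m <;> simp_all <;> omega

-- r is the (unique) maximum of L under the key (s ≤ m, s)
def isKMax (m : Int) (L : List Int) (r : Int) : Prop :=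
  r ∈ L ∧ ∀ x ∈ L, keyGt m x r = false

lemma kmax_unique {m : Int} {L : List Int} {r1 r2 : Int}
    (h1 : isKMax m L r1) (h2 : isKMax m L r2) : r1 = r2 :=
  keyGt_ff (h2.2 r1 h1.1) (h1.2 r2 h2.1)

-- B's running-best fold computes a key-maximum
lemma fold_kmax (m : Int) :
    ∀ (L : List Int) (b : Int), ∃ r, L.foldl (kstep m) (some b) = some r ∧ isKMax m (b :: L) r := by
  intro L
  induction L with
  | nil =>
      intro b
      refine ⟨b, rfl, List.mem_singleton.mpr rfl, ?_⟩
      intro x hx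
      rw [List.mem_singleton.mp hx]
      exact keyGt_false_cases (Or.inl ⟨le_refl b, by omega⟩)
  | cons x L ih =>
      intro b
      by_cases hk : keyGt m x b = true
      · obtain ⟨r, hf, hmem, hbnd⟩ := ih x
        refine ⟨r, ?_, ?_, ?_⟩
        · simpa [List.foldl_cons, kstep, hk] using hf
        · rcases List.mem_cons.mp hmem with h | h
          · exact h ▸ List.mem_cons_of_mem b (List.mem_cons_self)
          · exact List.mem_cons_of_mem b (List.mem_cons_of_mem x h)
        · intro y hy
          rcases List.mem_cons.mp hy with rfl | hy'
          · exact keyGt_trans_ff (keyGt_asymm hk) (hbnd x List.mem_cons_self)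
          · exact hbnd y hy'
      · obtain ⟨r, hf, hmem, hbnd⟩ := ih b
        refine ⟨r, ?_, ?_, ?_⟩
        · simpa [List.foldl_cons, kstep, hk] using hf
        · rcases List.mem_cons.mp hmem with h | h
          · exact h ▸ List.mem_cons_self
          · exact List.mem_cons_of_mem b (List.mem_cons_of_mem x h)
        · intro y hy
          rcases List.mem_cons.mp hy with rfl | hy'
          · exact hbnd y List.mem_cons_self
          · rcases List.mem_cons.mp hy' with rfl | hy''
            · exact keyGt_trans_ff (by simpa using hk) (hbnd b List.mem_cons_self)
            · exact hbnd y (List.mem_cons_of_mem b hy'')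

lemma pairwise_mono {res : List Int} (hp : res.Pairwise (· ≤ ·)) {a b : Nat}
    (hab : a ≤ b) (hb : b < res.length) : res[a]'(lt_of_le_of_lt (by omega) hb) ≤ res[b] := by
  rcases Nat.lt_or_ge a b with h | h
  · exact List.pairwise_iff_getElem.mp hp a b (by omega) hb h
  · have : a = b := by omega
    subst this; rfl

-- A's scan over the sorted sum list returns the key-maximum
lemma scan_eq_kmax (m : Int) (res : List Int) (hp : res.Pairwise (· ≤ ·)) (r : Int)
    (hr : isKMax m res r) (hlen : 0 < res.length) :
    ∀ (k i : Nat), res.length - i = k → i ≤ res.length →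
      (∀ j, j < i → res.getD j 0 ≤ m) → solutionScan m res i = r := by
  intro k
  induction k using Nat.strong_induction_on with
  | _ k ihk =>
    intro i hk hi hpre
    rw [solutionScan]
    by_cases hilen : i < res.length
    · rw [dif_pos hilen]
      by_cases hgt : m < res[i]
      · rw [if_pos hgt]
        rcases Nat.eq_zero_or_pos i with rfl | hipos
        · -- first sum already exceeds m: Python returns result[-1], the overall maximum
          have hneg : (((0 : Nat) : Int) - 1) = -(1 : Int) := by norm_num
          rw [hneg, PySem.List.pyGetD_neg_ofNat res 1 0 (by omega) (by omega)]
          refine (kmax_unique hr ⟨List.getElem_mem (by omega), ?_⟩).symm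
          intro x hx
          obtain ⟨t, ht, rfl⟩ := List.mem_iff_getElem.mp hx
          refine keyGt_false_cases (Or.inl ⟨pairwise_mono hp (by omega) (by omega), Or.inr ?_⟩)
          exact lt_of_lt_of_le hgt (pairwise_mono hp (Nat.zero_le t) ht)
        · -- Python returns result[i-1], the largest sum not exceeding m
          have hcast : ((i : Int) - 1) = (((i - 1 : Nat)) : Int) := by omega
          rw [hcast, PySem.List.pyGetD_natCast, List.getD_eq_getElem res 0 (by omega)]
          have hprev : res[i - 1]'(by omega) ≤ m := by
            have := hpre (i - 1) (by omega)
            rwa [List.getD_eq_getElem res 0 (by omega)] at this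
          refine (kmax_unique hr ⟨List.getElem_mem (by omega), ?_⟩).symm
          intro x hx
          obtain ⟨t, ht, rfl⟩ := List.mem_iff_getElem.mp hx
          rcases Nat.lt_or_ge t i with hti | hti
          · exact keyGt_false_cases (Or.inl ⟨pairwise_mono hp (by omega) (by omega), Or.inl hprev⟩)
          · refine keyGt_false_cases (Or.inr ⟨?_, hprev⟩)
            exact lt_of_lt_of_le hgt (pairwise_mono hp hti ht)
      · rw [if_neg hgt]
        exact ihk (res.length - (i + 1)) (by omega) (i + 1) rfl (by omega)
          (by intro j hj
              rcases Nat.lt_or_ge j i with h | h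
              · exact hpre j h
              · have : j = i := by omega
                subst this
                rw [List.getD_eq_getElem res 0 hilen]
                omega)
    · -- no sum exceeds m: Python returns result[-1], the overall maximum
      rw [dif_neg hilen]
      rw [PySem.List.pyGetD_neg_ofNat res 1 0 (by omega) (by omega)]
      have hall : ∀ (t : Nat) (ht : t < res.length), res[t] ≤ m := by
        intro t ht
        have := hpre t (by omega)
        rwa [List.getD_eq_getElem res 0 ht] at this
      refine (kmax_unique hr ⟨List.getElem_mem (by omega), ?_⟩).symm
      intro x hx
      obtain ⟨t, ht, rfl⟩ := List.mem_iff_getElem.mp hx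
      exact keyGt_false_cases
        (Or.inl ⟨pairwise_mono hp (by omega) (by omega), Or.inl (hall _ (by omega))⟩)

lemma combs_mem_length : ∀ (xs : List Int) (r : Nat) (t : List Int),
    t ∈ solutionCombs r xs → t.length = r := by
  intro xs
  induction xs with
  | nil =>
      intro r t ht
      cases r with
      | zero => simp [solutionCombs] at ht; simp [ht]
      | succ r => simp [solutionCombs] at ht
  | cons x xs ih =>
      intro r t ht
      cases r with
      | zero => simp [solutionCombs] at ht; simp [ht]
      | succ r =>
          simp only [solutionCombs, List.mem_append, List.mem_map] at ht
          rcases ht with ⟨t', ht', rfl⟩ | ht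
          · simp [ih r t' ht']
          · exact ih (r + 1) t ht

lemma combs_ne_nil : ∀ (xs : List Int) (r : Nat), r ≤ xs.length → solutionCombs r xs ≠ [] := by
  intro xs
  induction xs with
  | nil =>
      intro r hr
      have : r = 0 := by simpa using hr
      subst this
      simp [solutionCombs]
  | cons x xs ih =>
      intro r hr
      cases r with
      | zero => simp [solutionCombs]
      | succ r =>
          have h1 : solutionCombs r xs ≠ [] := ih r (by simpa using hr)
          simp only [solutionCombs, ne_eq, List.append_eq_nil_iff, List.map_eq_nil_iff, not_and]
          intro h
          exact absurd h h1

-- B's fold over index triples equals the running-best fold over the list of triple sums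
lemma alt_eq_fold (n m : Int) (num_card : List Int) :
    solution_alt n m num_card =
      (((solutionCombs 3 num_card).map List.sum).foldl (kstep m) none).getD 0 := by
  unfold solution_alt
  rw [List.foldl_map]
  congr 1
  apply PySem.List.foldl_congr_mem
  intro best t ht
  have h3 := combs_mem_length num_card 3 t ht
  match t, h3 with
  | [a, b, c], _ =>
      simp only [List.sum_cons, List.sum_nil]
      congr 1
      ring

-- ===== VERDICT (by name: the statement is the Claim_ definition above) =====
theorem solution_spec : Claim_equal_solution := by
  intro n m num_card _ hpre
  unfold Spec_solution
  unfold Pre_solution at hpre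
  set S : List Int := (solutionCombs 3 num_card).map List.sum with hSdef
  have hSne : S ≠ [] := by
    rw [hSdef]
    simp only [ne_eq, List.map_eq_nil_iff]
    exact combs_ne_nil num_card 3 hpre
  obtain ⟨s0, rest, hcons⟩ := List.exists_cons_of_ne_nil hSne
  obtain ⟨r, hfold, hkm⟩ := fold_kmax m rest s0
  have hB : solution_alt n m num_card = r := by
    rw [alt_eq_fold, ← hSdef, hcons]
    simp only [List.foldl_cons, kstep]
    rw [hfold]
    rfl
  have hA : solution n m num_card = solutionScan m (PySem.List.sorted S (fun s => s) false) 0 := by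
    show solutionScan m (PySem.List.sorted
        ((solutionCombs 3 num_card).foldl (fun acc i => acc ++ [i.sum]) []) (fun s => s) false) 0 = _
    rw [PySem.List.foldl_append_singleton_eq_map, List.nil_append, ← hSdef]
  have hperm : (PySem.List.sorted S (fun s => s) false).Perm S :=
    PySem.List.sorted_perm S (fun s => s) false
  have hkmS : isKMax m (PySem.List.sorted S (fun s => s) false) r := by
    refine ⟨hperm.mem_iff.mpr (hcons ▸ hkm.1), ?_⟩
    intro x hx
    exact hkm.2 x (hcons ▸ hperm.subset hx)
  have hpw : (PySem.List.sorted S (fun s => s) false).Pairwise (· ≤ ·) := by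
    simpa using PySem.List.sorted_pairwise S (fun s => s)
  have hlen : 0 < (PySem.List.sorted S (fun s => s) false).length := by
    rw [hperm.length_eq, hcons]
    simp
  rw [hA, hB]
  exact scan_eq_kmax m _ hpw r hkmS hlen _ 0 rfl (by omega) (by intro j hj; omega)
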